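-- pv_equiv track=rewrite | github.com/a-teufel/Flu_PTM | Flu_PTM_github_reorganized/scripts/pipeline/automated_all_6_fixed_alignment_headers.py | _position_map
-- ===== SOURCE A (Python) =====
-- def _position_map(aligned_seq):
--     """Return aligned→unaligned and unaligned→aligned index dicts."""
--     aln2unaln, unaln2aln = {}, {}
--     u = 0
--     for a, aa in enumerate(aligned_seq):
--         if aa != "-":
--             aln2unaln[a] = u
--             unaln2aln[u] = a
--             u += 1
--     return aln2unaln, unaln2aln
-- ===== SOURCE B (Python) =====
-- def _position_map(aligned_seq):
--     """Return aligned→unaligned and unaligned→aligned index dicts."""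
--     aln2unaln, unaln2aln = {}, {}
--     a = u = 0
--     for seg in aligned_seq.split("-"):
--         m = len(seg)
--         for k in range(m):
--             aln2unaln[a + k] = u + k
--             unaln2aln[u + k] = a + k
--         a += m + 1
--         u += m
--     return aln2unaln, unaln2aln
-- ===== Notes on version B (the rewrite author's own statement) =====
-- stated objective: alternative
-- what changed: Instead of A's per-character scan with a manual unaligned counter, B splits the sequence on the gap character and, for each gap-free segment, block-fills both dicts from index ranges, advancing the aligned offset by the segment length plus the consumed separator.
import Mathlib
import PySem

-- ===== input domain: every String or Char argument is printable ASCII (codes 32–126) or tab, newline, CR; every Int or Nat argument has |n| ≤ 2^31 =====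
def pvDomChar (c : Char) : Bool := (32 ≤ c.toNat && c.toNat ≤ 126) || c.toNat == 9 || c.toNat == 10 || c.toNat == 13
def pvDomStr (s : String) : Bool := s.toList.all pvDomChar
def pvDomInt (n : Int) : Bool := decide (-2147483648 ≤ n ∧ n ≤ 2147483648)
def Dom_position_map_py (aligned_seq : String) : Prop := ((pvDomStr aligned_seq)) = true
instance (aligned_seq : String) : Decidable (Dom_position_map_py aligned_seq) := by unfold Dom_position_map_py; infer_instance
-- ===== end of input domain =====

-- B replaces A's per-character scan with a manual counter by splitting the sequence on
-- '-' and block-filling both dicts with index ranges per gap-free segment (objective: alternative).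

-- ===== PORT A =====
-- one iteration of A's for-loop: state = (aln2unaln, unaln2aln, u)
def pmStep (st : PySem.Dict Int Int × PySem.Dict Int Int × Int) (p : Int × Char) :
    PySem.Dict Int Int × PySem.Dict Int Int × Int :=
  if p.2 != '-' then (st.1.insert p.1 st.2.2, st.2.1.insert st.2.2 p.1, st.2.2 + 1) else st

def position_map_py (aligned_seq : String) : (List (Int × Int)) × (List (Int × Int)) :=
  let st := (PySem.List.enumerate aligned_seq.toList 0).foldl pmStep (.empty, .empty, 0)
  (st.1.items, st.2.1.items)

-- ===== PORT B =====
-- inner loop body of Source B: for k in range(m): aln2unaln[a+k] = u+k; unaln2aln[u+k] = a+k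
def pmBlockStep (a u : Int) (t : PySem.Dict Int Int × PySem.Dict Int Int) (k : Int) :
    PySem.Dict Int Int × PySem.Dict Int Int :=
  (t.1.insert (a + k) (u + k), t.2.insert (u + k) (a + k))

-- one iteration of Source B's outer loop over the segments: state = (aln2unaln, unaln2aln, a, u)
def pmSegStep (st : PySem.Dict Int Int × PySem.Dict Int Int × Int × Int) (seg : List Char) :
    PySem.Dict Int Int × PySem.Dict Int Int × Int × Int :=
  let m : Int := seg.length
  let t := (PySem.List.pyRange 0 m 1).foldl (pmBlockStep st.2.2.1 st.2.2.2) (st.1, st.2.1)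
  (t.1, t.2, st.2.2.1 + m + 1, st.2.2.2 + m)

def position_map_py_alt (aligned_seq : String) : (List (Int × Int)) × (List (Int × Int)) :=
  -- aligned_seq.split("-"): the separator is nonempty, so this is exactly PySem.Chars.splitOn
  let segs := PySem.Chars.splitOn aligned_seq.toList ['-']
  let st := segs.foldl pmSegStep (.empty, .empty, 0, 0)
  (st.1.items, st.2.1.items)

-- ===== PRECONDITION & SPEC =====
def Spec_position_map_py (aligned_seq : String) (out : (List (Int × Int)) × (List (Int × Int))) : Prop := out = position_map_py_alt aligned_seq
instance (aligned_seq : String) (out : (List (Int × Int)) × (List (Int × Int))) : Decidable (Spec_position_map_py aligned_seq out) := by unfold Spec_position_map_py; infer_instance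

-- ===== CLAIM (what is proved, stated in full; the proofs are below) =====
def Claim_equal_position_map_py : Prop := ∀ (aligned_seq : String), Dom_position_map_py aligned_seq → Spec_position_map_py aligned_seq (position_map_py aligned_seq)

-- ===== LEMMAS AND PROOFS =====

-- the non-gap aligned positions of l, starting at aligned index a0
def pmPositions (l : List Char) (a0 : Int) : List Int :=
  ((PySem.List.enumerate l a0).filter (fun p => p.2 != '-')).map (·.1)

-- a block of m consecutive aligned positions starting at a
def pmBlock (a : Int) (m : Nat) : List Int := (List.range m).map (fun k => a + (k : Int))

-- proof-side model of splitting on '-'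
def pmSplit : List Char → List Char → List (List Char)
  | [], cur => [cur.reverse]
  | c :: rest, cur =>
      if c = '-' then cur.reverse :: pmSplit rest [] else pmSplit rest (c :: cur)

-- the fuelled PySem splitter equals the model when the fuel suffices
theorem pm_go_eq (fuel : Nat) : ∀ (l cur : List Char) (acc : List (List Char)),
    l.length ≤ fuel →
    PySem.Chars.splitOn.go ['-'] fuel l cur acc = acc.reverse ++ pmSplit l cur := by
  induction fuel with
  | zero =>
    intro l cur acc h
    have : l = [] := List.eq_nil_of_length_eq_zero (Nat.le_zero.mp h)
    subst this
    simp [PySem.Chars.splitOn.go, pmSplit]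
  | succ fuel ih =>
    intro l cur acc h
    cases l with
    | nil => simp [PySem.Chars.splitOn.go, pmSplit]
    | cons c rest =>
      by_cases hc : c = '-'
      · subst hc
        have hpre : List.isPrefixOf ['-'] ('-' :: rest) = true := by
          simp [List.isPrefixOf]
        simp only [PySem.Chars.splitOn.go, hpre, if_true, List.length_cons]
        have hd : List.drop (List.length ([] : List Char) + 1) ('-' :: rest) = rest := rfl
        rw [hd, ih rest [] _ (by simpa using h)]
        simp [pmSplit]
      · have hpre : List.isPrefixOf ['-'] (c :: rest) = false := by
          show ('-' == c && List.isPrefixOf ([] : List Char) rest) = false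
          simp [Ne.symm hc]
        simp only [PySem.Chars.splitOn.go, hpre, Bool.false_eq_true, if_false]
        rw [ih rest (c :: cur) _ (by simpa using Nat.le_of_succ_le_succ h)]
        simp [pmSplit, hc]

theorem pm_splitOn_eq (l : List Char) :
    PySem.Chars.splitOn l ['-'] = pmSplit l [] := by
  have := pm_go_eq (l.length + 1) l [] [] (by omega)
  simpa [PySem.Chars.splitOn] using this

-- positions contributed by the segments of pmSplit, with consecutive aligned starts
def pmPosOf : List (List Char) → Int → List Int
  | [], _ => []
  | seg :: rest, a => pmBlock a seg.length ++ pmPosOf rest (a + seg.length + 1)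

theorem pmBlock_succ (a : Int) (m : Nat) :
    pmBlock a (m + 1) = pmBlock a m ++ [a + (m : Int)] := by
  simp [pmBlock, List.range_succ]

-- the segments of pmSplit carry exactly the non-gap positions
theorem pm_posOf_split (l : List Char) : ∀ (cur : List Char) (a : Int),
    pmPosOf (pmSplit l cur) a = pmBlock a cur.length ++ pmPositions l (a + cur.length) := by
  induction l with
  | nil => intro cur a; simp [pmSplit, pmPosOf, pmPositions, PySem.List.enumerate_nil]
  | cons c rest ih =>
    intro cur a
    by_cases hc : c = '-'
    · subst hc
      simp only [pmSplit, if_true]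
      simp only [pmPosOf, List.length_reverse]
      rw [ih [] (a + cur.length + 1)]
      simp [pmPositions, PySem.List.enumerate_cons, pmBlock]
    · simp only [pmSplit, hc, if_false]
      rw [ih (c :: cur) a]
      simp only [List.length_cons, pmBlock_succ]
      simp [pmPositions, PySem.List.enumerate_cons, hc]
      ring_nf

-- enumerating a block gives the (u+k, a+k) pairs
theorem pm_enumerate_block (m : Nat) (a u : Int) :
    PySem.List.enumerate (pmBlock a m) u
      = (List.range m).map (fun k => (u + (k : Int), a + (k : Int))) := by
  induction m with
  | zero => simp [pmBlock, PySem.List.enumerate_nil]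
  | succ m ih =>
    rw [pmBlock_succ, PySem.List.enumerate_append, ih]
    simp [pmBlock, List.range_succ]

-- Source B's inner loop: appends the block's pairs to both dicts, keys stay bounded
theorem pm_inner (m : Nat) (d1 d2 : PySem.Dict Int Int) (a u : Int)
    (h1 : ∀ k ∈ d1.keys, k < a) (h2 : ∀ k ∈ d2.keys, k < u) :
    ((PySem.List.pyRange 0 m 1).foldl (pmBlockStep a u) (d1, d2)).1.items
        = d1.items ++ (List.range m).map (fun k => (a + (k : Int), u + (k : Int)))
    ∧ ((PySem.List.pyRange 0 m 1).foldl (pmBlockStep a u) (d1, d2)).2.items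
        = d2.items ++ (List.range m).map (fun k => (u + (k : Int), a + (k : Int)))
    ∧ (∀ k ∈ ((PySem.List.pyRange 0 m 1).foldl (pmBlockStep a u) (d1, d2)).1.keys, k < a + m)
    ∧ (∀ k ∈ ((PySem.List.pyRange 0 m 1).foldl (pmBlockStep a u) (d1, d2)).2.keys, k < u + m) := by
  induction m with
  | zero =>
    rw [show PySem.List.pyRange 0 ((0 : Nat) : Int) 1 = [] from
      PySem.List.pyRange_one_eq_nil (by simp)]
    simpa using ⟨h1, h2⟩
  | succ m ih =>
    have hsplit : PySem.List.pyRange 0 ((m : Int) + 1) 1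
        = PySem.List.pyRange 0 (m : Int) 1 ++ [(m : Int)] :=
      PySem.List.pyRange_one_succ_right (a := 0) (b := (m : Int)) (by positivity)
    have hcast : ((m + 1 : Nat) : Int) = (m : Int) + 1 := by push_cast; ring
    obtain ⟨i1, i2, k1, k2⟩ := ih
    set t := (PySem.List.pyRange 0 (m : Int) 1).foldl (pmBlockStep a u) (d1, d2) with ht
    have hc1 : t.1.contains (a + m) = false := by
      rw [PySem.Dict.contains_eq_decide_mem_keys]
      simp only [decide_eq_false_iff_not]
      intro hmem; exact absurd (k1 _ hmem) (lt_irrefl _)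
    have hc2 : t.2.contains (u + m) = false := by
      rw [PySem.Dict.contains_eq_decide_mem_keys]
      simp only [decide_eq_false_iff_not]
      intro hmem; exact absurd (k2 _ hmem) (lt_irrefl _)
    rw [hcast, hsplit, List.foldl_append]
    simp only [List.foldl_cons, List.foldl_nil, ← ht]
    refine ⟨?_, ?_, ?_, ?_⟩
    · show (t.1.insert (a + m) (u + m)).items = _
      rw [PySem.Dict.items_insert_of_not_contains _ _ hc1, i1]
      simp [List.range_succ]
    · show (t.2.insert (u + m) (a + m)).items = _
      rw [PySem.Dict.items_insert_of_not_contains _ _ hc2, i2]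
      simp [List.range_succ]
    · show ∀ k ∈ (t.1.insert (a + m) (u + m)).keys, _
      rw [PySem.Dict.keys_insert_of_not_contains _ _ hc1]
      intro k hk
      rcases List.mem_append.mp hk with h | h
      · have := k1 _ h; omega
      · simp at h; omega
    · show ∀ k ∈ (t.2.insert (u + m) (a + m)).keys, _
      rw [PySem.Dict.keys_insert_of_not_contains _ _ hc2]
      intro k hk
      rcases List.mem_append.mp hk with h | h
      · have := k2 _ h; omega
      · simp at h; omega

-- Source B's outer loop: appends the enumerate-pairs of the positions of all segments
theorem pm_outer (segs : List (List Char)) :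
    ∀ (d1 d2 : PySem.Dict Int Int) (a u : Int),
    (∀ k ∈ d1.keys, k < a) → (∀ k ∈ d2.keys, k < u) →
    ((segs.foldl pmSegStep (d1, d2, a, u)).1.items
        = d1.items ++ (PySem.List.enumerate (pmPosOf segs a) u).map (fun p => (p.2, p.1)))
    ∧ ((segs.foldl pmSegStep (d1, d2, a, u)).2.1.items
        = d2.items ++ PySem.List.enumerate (pmPosOf segs a) u) := by
  induction segs with
  | nil => intro d1 d2 a u _ _; simp [pmPosOf, PySem.List.enumerate_nil]
  | cons seg rest ih =>
    intro d1 d2 a u h1 h2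
    obtain ⟨i1, i2, k1, k2⟩ := pm_inner seg.length d1 d2 a u h1 h2
    simp only [List.foldl_cons, pmSegStep]
    set t := (PySem.List.pyRange 0 (seg.length : Int) 1).foldl (pmBlockStep a u) (d1, d2) with ht
    obtain ⟨j1, j2⟩ := ih t.1 t.2 (a + seg.length + 1) (u + seg.length)
      (fun k hk => by have := k1 k hk; omega) k2
    have hlen : ((pmBlock a seg.length).length : Int) = (seg.length : Int) := by
      simp [pmBlock]
    constructor
    · show (rest.foldl pmSegStep (t.1, t.2, _, _)).1.items = _
      rw [j1, i1]
      simp only [pmPosOf, PySem.List.enumerate_append, hlen, pm_enumerate_block,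
        List.map_append, List.map_map, List.append_assoc]
      rfl
    · show (rest.foldl pmSegStep (t.1, t.2, _, _)).2.1.items = _
      rw [j2, i2]
      simp only [pmPosOf, PySem.List.enumerate_append, hlen, pm_enumerate_block,
        List.append_assoc]

-- ===== A-side lemmas =====
-- A's loop, on any suffix with start indices a0/u0 and accumulated dicts whose keys are
-- all below a0 resp. u0, appends exactly the pairs indexed by the non-gap position table.
theorem pm_loop (l : List Char) : ∀ (a0 u0 : Int) (d1 d2 : PySem.Dict Int Int),
    (∀ k ∈ d1.keys, k < a0) → (∀ k ∈ d2.keys, k < u0) →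
    ((PySem.List.enumerate l a0).foldl pmStep (d1, d2, u0)).1.items
        = d1.items ++ (PySem.List.enumerate (pmPositions l a0) u0).map (fun p => (p.2, p.1))
    ∧ ((PySem.List.enumerate l a0).foldl pmStep (d1, d2, u0)).2.1.items
        = d2.items ++ PySem.List.enumerate (pmPositions l a0) u0 := by
  induction l with
  | nil => intro a0 u0 d1 d2 _ _; simp [PySem.List.enumerate_nil, pmPositions]
  | cons c l ih =>
    intro a0 u0 d1 d2 h1 h2
    rw [PySem.List.enumerate_cons]
    by_cases hc : (c != '-') = true
    · have hc1 : d1.contains a0 = false := by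
        rw [PySem.Dict.contains_eq_decide_mem_keys]
        simp only [decide_eq_false_iff_not]
        intro hmem; exact absurd (h1 _ hmem) (lt_irrefl a0)
      have hc2 : d2.contains u0 = false := by
        rw [PySem.Dict.contains_eq_decide_mem_keys]
        simp only [decide_eq_false_iff_not]
        intro hmem; exact absurd (h2 _ hmem) (lt_irrefl u0)
      have hstep : pmStep (d1, d2, u0) (a0, c)
          = (d1.insert a0 u0, d2.insert u0 a0, u0 + 1) := by
        simp [pmStep, hc]
      have h1' : ∀ k ∈ (d1.insert a0 u0).keys, k < a0 + 1 := by
        rw [PySem.Dict.keys_insert_of_not_contains d1 u0 hc1]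
        intro k hk
        rcases List.mem_append.mp hk with h | h
        · exact lt_trans (h1 _ h) (by omega)
        · simp at h; omega
      have h2' : ∀ k ∈ (d2.insert u0 a0).keys, k < u0 + 1 := by
        rw [PySem.Dict.keys_insert_of_not_contains d2 a0 hc2]
        intro k hk
        rcases List.mem_append.mp hk with h | h
        · exact lt_trans (h2 _ h) (by omega)
        · simp at h; omega
      have := ih (a0 + 1) (u0 + 1) (d1.insert a0 u0) (d2.insert u0 a0) h1' h2'
      rw [List.foldl_cons, hstep]
      refine ⟨?_, ?_⟩
      · rw [this.1, PySem.Dict.items_insert_of_not_contains d1 u0 hc1]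
        simp [pmPositions, hc, PySem.List.enumerate_cons]
      · rw [this.2, PySem.Dict.items_insert_of_not_contains d2 a0 hc2]
        simp [pmPositions, hc, PySem.List.enumerate_cons]
    · have hstep : pmStep (d1, d2, u0) (a0, c) = (d1, d2, u0) := by
        simp only [pmStep]; rw [if_neg hc]
      have h1' : ∀ k ∈ d1.keys, k < a0 + 1 := fun k hk => lt_trans (h1 k hk) (by omega)
      have := ih (a0 + 1) u0 d1 d2 h1' h2
      rw [List.foldl_cons, hstep]
      simpa [pmPositions, List.filter_cons, hc] using this

-- ===== VERDICT (by name: the statement is the Claim_ definition above) =====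
theorem position_map_py_spec : Claim_equal_position_map_py := by
  intro s _
  unfold Spec_position_map_py position_map_py position_map_py_alt
  have hemp : (PySem.Dict.empty : PySem.Dict Int Int).items = [] := rfl
  obtain ⟨hA1, hA2⟩ := pm_loop s.toList 0 0 .empty .empty
    (by simp [PySem.Dict.keys_empty]) (by simp [PySem.Dict.keys_empty])
  obtain ⟨hB1, hB2⟩ := pm_outer (PySem.Chars.splitOn s.toList ['-']) .empty .empty 0 0
    (by simp [PySem.Dict.keys_empty]) (by simp [PySem.Dict.keys_empty])
  have hpos : pmPosOf (PySem.Chars.splitOn s.toList ['-']) 0 = pmPositions s.toList 0 := by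
    rw [pm_splitOn_eq, pm_posOf_split]
    simp [pmBlock]
  rw [hemp, List.nil_append] at hA1 hA2 hB1 hB2
  refine Prod.ext ?_ ?_
  · simp only
    rw [hA1, hB1, hpos]
  · simp only
    rw [hA2, hB2, hpos]
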